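-- pv_equiv track=rewrite | github.com/EvezArt/evez666-advancement | evez-docs/evez-os-fix-falsifier-gate/core/memory_entanglement.py | sat_contradiction_check
-- ===== SOURCE A (Python) =====
-- from typing import Any, Dict, FrozenSet, List, Optional, Set, Tuple
--
-- def sat_contradiction_check(anchor_constraints: List[List[int]]) -> Tuple[bool, List[List[int]]]:
--     """
--     Simple DPLL-style unit propagation for small clause sets.
--
--     anchor_constraints: list of clauses (each clause = list of literals, positive=True, negative=False)
--     Returns (is_contradicted, minimal_unsat_core)
--
--     O(2^n) worst case — only use for SAFETY INVARIANTS (small clause sets).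
--     Failure mode: MODELING_GAP — NL → propositional encoding is lossy.
--     """
--     def unit_propagate(clauses, assignment):
--         changed = True
--         while changed:
--             changed = False
--             for clause in clauses:
--                 unassigned = [lit for lit in clause if abs(lit) not in assignment]
--                 satisfied = any(
--                     (lit > 0 and assignment.get(abs(lit)) is True) or
--                     (lit < 0 and assignment.get(abs(lit)) is False)
--                     for lit in clause
--                 )
--                 if satisfied:
--                     continue
--                 if len(unassigned) == 0:
--                     return False, assignment  # Empty clause = contradiction
--                 if len(unassigned) == 1:
--                     lit = unassigned[0]
--                     assignment[abs(lit)] = lit > 0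
--                     changed = True
--         return True, assignment
--
--     assignment = {}
--     ok, _ = unit_propagate(anchor_constraints, assignment)
--     if not ok:
--         return True, anchor_constraints  # Contradiction found
--     return False, []
-- ===== SOURCE B (Python) =====
-- from typing import List, Tuple
--
--
-- def _lit_true(lit: int, assignment) -> bool:
--     v = assignment.get(abs(lit))
--     return (lit > 0 and v is True) or (lit < 0 and v is False)
--
--
-- def sat_contradiction_check(anchor_constraints: List[List[int]]) -> Tuple[bool, List[List[int]]]:
--     """Incremental unit propagation with a worklist: per-clause counters of
--     unassigned literal occurrences, an occurrence index from variable to the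
--     clauses containing it, and a queue of candidate unit/empty clauses; each
--     clause is re-examined only when one of its variables gets assigned."""
--     count = []          # per-clause number of literal occurrences with unassigned variable
--     occ = {}            # variable -> clause indices, one entry per occurrence
--     pending = []        # worklist of clause indices whose counter dropped to <= 1
--     for i, clause in enumerate(anchor_constraints):
--         count.append(len(clause))
--         for lit in clause:
--             occ.setdefault(abs(lit), []).append(i)
--         if len(clause) <= 1:
--             pending.append(i)
--     assignment = {}
--     head = 0
--     while head < len(pending):
--         i = pending[head]
--         head += 1
--         clause = anchor_constraints[i]
--         if any(_lit_true(lit, assignment) for lit in clause):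
--             continue
--         unit = None
--         for lit in clause:
--             if abs(lit) not in assignment:
--                 unit = lit
--                 break
--         if unit is None:
--             return True, anchor_constraints   # falsified clause: contradiction
--         v = abs(unit)
--         assignment[v] = unit > 0
--         for j in occ[v]:
--             count[j] -= 1
--             if count[j] <= 1:
--                 pending.append(j)
--     return False, []
-- ===== Notes on version B (the rewrite author's own statement) =====
-- stated objective: alternative
-- what changed: Replaces A's repeated full rescans of all clauses until no change (fixpoint passes over the whole clause list) by incremental worklist unit propagation: per-clause counters of unassigned-literal occurrences, a variable-to-clauses occurrence index built once, and a queue of candidate unit/empty clauses, so a clause is re-examined only when one of its variables is assigned; the verdicts agree by confluence of unit propagation.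
import Mathlib
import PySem

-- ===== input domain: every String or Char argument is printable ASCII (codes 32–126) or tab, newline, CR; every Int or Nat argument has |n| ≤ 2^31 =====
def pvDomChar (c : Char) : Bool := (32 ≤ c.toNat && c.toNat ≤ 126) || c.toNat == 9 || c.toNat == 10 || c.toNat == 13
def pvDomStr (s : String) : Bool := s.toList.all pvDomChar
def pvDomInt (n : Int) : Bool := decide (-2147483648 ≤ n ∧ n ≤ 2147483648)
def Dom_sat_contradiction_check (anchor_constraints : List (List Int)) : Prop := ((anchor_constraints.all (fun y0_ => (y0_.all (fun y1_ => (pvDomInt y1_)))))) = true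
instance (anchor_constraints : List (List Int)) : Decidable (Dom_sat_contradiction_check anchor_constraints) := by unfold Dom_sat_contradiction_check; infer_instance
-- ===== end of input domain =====

-- B replaces A's repeated full rescans of the clause list by incremental worklist propagation:
-- per-clause counters of unassigned-literal occurrences, a variable→clauses occurrence index and a
-- queue of candidate unit clauses, so a clause is re-examined only when one of its variables is
-- assigned (an alternative algorithm; the proved claim is about the return value only).

-- ===== PORT A =====
-- A's unit_propagate: one 'for clause in clauses' pass; threads (changed, assignment); none = empty clause met
def aPass : List (List Int) → Bool → PySem.Dict Int Bool → Option (Bool × PySem.Dict Int Bool)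
  | [], changed, a => some (changed, a)
  | clause :: rest, changed, a =>
    let unassigned := clause.filter (fun lit => !(a.contains |lit|))
    let satisfied := clause.any (fun lit =>
      (decide (0 < lit) && (a.get? |lit| == some true)) ||
      (decide (lit < 0) && (a.get? |lit| == some false)))
    if satisfied then aPass rest changed a
    else
      match unassigned with
      | [] => none
      | [lit] => aPass rest true (a.insert |lit| (decide (0 < lit)))
      | _ => aPass rest changed a

-- A's 'while changed' loop (fuel is provably sufficient: each changed pass enlarges the assignment)
def aLoop : Nat → List (List Int) → PySem.Dict Int Bool → Bool × PySem.Dict Int Bool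
  | 0, _, a => (true, a)
  | fuel+1, clauses, a =>
    match aPass clauses false a with
    | none => (false, a)
    | some (changed, a') => if changed then aLoop fuel clauses a' else (true, a')

def sat_contradiction_check (anchor_constraints : List (List Int)) : Bool × List (List Int) :=
  let r := aLoop (anchor_constraints.flatten.length + 1) anchor_constraints PySem.Dict.empty
  if !r.1 then (true, anchor_constraints) else (false, [])

-- ===== PORT B =====
-- Source B's _lit_true
def litTrue (assignment : PySem.Dict Int Bool) (lit : Int) : Bool :=
  (decide (0 < lit) && (assignment.get? |lit| == some true)) ||
  (decide (lit < 0) && (assignment.get? |lit| == some false))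

-- Source B's inner 'for lit in clause: occ.setdefault(abs(lit), []).append(i)'
def bOccClause (i : Nat) (occ : PySem.Dict Int (List Nat)) (clause : List Int) : PySem.Dict Int (List Nat) :=
  clause.foldl (fun o lit => o.insert |lit| (o.getD |lit| [] ++ [i])) occ

-- Source B's first loop 'for i, clause in enumerate(anchor_constraints)' building (occ, count, pending)
def bInit : List (List Int) → Nat → PySem.Dict Int (List Nat) × List Int × List Nat → PySem.Dict Int (List Nat) × List Int × List Nat
  | [], _, st => st
  | clause :: rest, i, (occ, cnts, pend) =>
      bInit rest (i+1)
        (bOccClause i occ clause,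
         cnts ++ [(clause.length : Int)],
         if clause.length ≤ 1 then pend ++ [i] else pend)

-- Source B's 'for j in occ[v]: count[j] -= 1; if count[j] <= 1: pending.append(j)'
def bDecr : List Nat → List Int → List Nat → List Int × List Nat
  | [], cnts, pend => (cnts, pend)
  | j :: rest, cnts, pend =>
      let cnts' := cnts.set j (cnts.getD j 0 - 1)
      if cnts'.getD j 0 ≤ 1 then bDecr rest cnts' (pend ++ [j]) else bDecr rest cnts' pend

-- Source B's 'while head < len(pending)' loop; the list argument is the unprocessed queue suffix
def bLoop : Nat → List (List Int) → PySem.Dict Int (List Nat) → List Int → PySem.Dict Int Bool → List Nat → Bool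
  | 0, _, _, _, _, _ => false
  | fuel+1, cs, occ, cnts, a, pending =>
    match pending with
    | [] => false
    | i :: rest =>
      let clause := cs.getD i []
      if clause.any (litTrue a) then bLoop fuel cs occ cnts a rest
      else
        match clause.find? (fun lit => !(a.contains |lit|)) with
        | none => true
        | some lit =>
          let vp := bDecr (occ.getD |lit| []) cnts rest
          bLoop fuel cs occ vp.1 (a.insert |lit| (decide (0 < lit))) vp.2

def sat_contradiction_check_alt (anchor_constraints : List (List Int)) : Bool × List (List Int) :=
  let st := bInit anchor_constraints 0 (PySem.Dict.empty, [], [])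
  if bLoop (anchor_constraints.length + anchor_constraints.flatten.length + 1)
       anchor_constraints st.1 st.2.1 PySem.Dict.empty st.2.2
  then (true, anchor_constraints) else (false, [])

-- ===== PRECONDITION & SPEC =====
def Spec_sat_contradiction_check (anchor_constraints : List (List Int)) (out : Bool × List (List Int)) : Prop := out = sat_contradiction_check_alt anchor_constraints
instance (anchor_constraints : List (List Int)) (out : Bool × List (List Int)) : Decidable (Spec_sat_contradiction_check anchor_constraints out) := by unfold Spec_sat_contradiction_check; infer_instance

-- ===== CLAIM (what is proved, stated in full; the proofs are below) =====
def Claim_equal_sat_contradiction_check : Prop := ∀ (anchor_constraints : List (List Int)), Dom_sat_contradiction_check anchor_constraints → Spec_sat_contradiction_check anchor_constraints (sat_contradiction_check anchor_constraints)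

-- ===== LEMMAS AND PROOFS =====

-- Sub-assignment: b extends a
def DSub (a b : PySem.Dict Int Bool) : Prop := ∀ k v, a.get? k = some v → b.get? k = some v

-- number of occurrences of literals whose variable is unassigned
def unCount (a : PySem.Dict Int Bool) (c : List Int) : Nat :=
  (c.filter (fun lit => !(a.contains |lit|))).length

-- a clause blocked under α: satisfied, or at least two unassigned occurrences
def GoodC (α : PySem.Dict Int Bool) (c : List Int) : Prop :=
  c.any (litTrue α) = true ∨ 2 ≤ unCount α c

lemma dsub_contains {a b : PySem.Dict Int Bool} (h : DSub a b) {k : Int}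
    (hk : a.contains k = true) : b.contains k = true := by
  rw [PySem.Dict.contains_eq_isSome_get?] at hk ⊢
  obtain ⟨v, hv⟩ := Option.isSome_iff_exists.mp hk
  simp [h k v hv]

lemma litTrue_of_agree {a α : PySem.Dict Int Bool} (hsub : DSub a α) {l : Int} {v : Bool}
    (hv : a.get? |l| = some v) (hlt : litTrue α l = true) : litTrue a l = true := by
  have hαv := hsub _ _ hv
  unfold litTrue at hlt ⊢
  rcases Bool.or_eq_true_iff.mp hlt with h1 | h1 <;>
    simp only [Bool.and_eq_true, decide_eq_true_eq, beq_iff_eq] at h1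
  · cases Option.some.inj (hαv ▸ h1.2); simp [hv, h1.1]
  · cases Option.some.inj (hαv ▸ h1.2); simp [hv, h1.1]

lemma length_filter_mono {l : List Int} {p q : Int → Bool}
    (h : ∀ x ∈ l, p x = true → q x = true) :
    (l.filter p).length ≤ (l.filter q).length := by
  induction l with
  | nil => simp
  | cons x xs ih =>
    have ih' := ih (fun y hy => h y (List.mem_cons_of_mem _ hy))
    by_cases hp : p x = true
    · simp [hp, h x (by simp) hp]; omega
    · simp only [List.filter_cons]
      rcases Bool.eq_false_or_eq_true (q x) with hq | hq <;> simp [hp, hq] <;> omega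

lemma unCount_mono {a α : PySem.Dict Int Bool} (h : DSub a α) (c : List Int) :
    unCount α c ≤ unCount a c := by
  apply length_filter_mono
  intro x _ hx
  simp only [Bool.not_eq_true'] at hx ⊢
  cases hc : a.contains |x| with
  | false => rfl
  | true => exact absurd (dsub_contains h hc) (by simp [hx])

-- core clause analysis: under DSub a α and GoodC α c, a clause unsatisfied under a is never empty,
-- and if it is unit with literal l then α forces l's value
lemma goodC_not_empty {a α : PySem.Dict Int Bool} (hsub : DSub a α) {c : List Int}
    (hg : GoodC α c) (hsat : c.any (litTrue a) = false)
    (hfilt : c.filter (fun lit => !(a.contains |lit|)) = []) : False := by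
  rcases hg with hg | hg
  · obtain ⟨l, hl, hlt⟩ := List.any_eq_true.mp hg
    have hca : a.contains |l| = true := by
      by_contra hna
      have hna' : a.contains |l| = false := by
        cases h' : a.contains |l| with
        | true => exact absurd h' hna
        | false => rfl
      have hmem : l ∈ c.filter (fun lit => !(a.contains |lit|)) := by
        rw [List.mem_filter]; exact ⟨hl, by simp [hna']⟩
      rw [hfilt] at hmem; simp at hmem
    rw [PySem.Dict.contains_eq_isSome_get?] at hca
    obtain ⟨v, hv⟩ := Option.isSome_iff_exists.mp hca
    have := List.any_eq_true.mpr ⟨l, hl, litTrue_of_agree hsub hv hlt⟩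
    rw [hsat] at this; exact absurd this (by simp)
  · have hm := unCount_mono hsub c
    have h0 : unCount a c = 0 := by unfold unCount; rw [hfilt]; rfl
    omega

lemma goodC_unit {a α : PySem.Dict Int Bool} (hsub : DSub a α) {c : List Int} {l : Int}
    (hg : GoodC α c) (hsat : c.any (litTrue a) = false)
    (hfilt : c.filter (fun lit => !(a.contains |lit|)) = [l]) :
    α.get? |l| = some (decide (0 < l)) := by
  rcases hg with hg | hg
  · obtain ⟨l0, hl0, hlt⟩ := List.any_eq_true.mp hg
    have hna : a.contains |l0| = false := by
      cases h' : a.contains |l0| with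
      | false => rfl
      | true =>
        rw [PySem.Dict.contains_eq_isSome_get?] at h'
        obtain ⟨v, hv⟩ := Option.isSome_iff_exists.mp h'
        have := List.any_eq_true.mpr ⟨l0, hl0, litTrue_of_agree hsub hv hlt⟩
        rw [hsat] at this; exact absurd this (by simp)
    have hmem : l0 ∈ c.filter (fun lit => !(a.contains |lit|)) := by
      rw [List.mem_filter]; exact ⟨hl0, by simp [hna]⟩
    rw [hfilt] at hmem
    have hll : l0 = l := by simpa using hmem
    subst hll
    unfold litTrue at hlt
    rcases Bool.or_eq_true_iff.mp hlt with h1 | h1 <;>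
      simp only [Bool.and_eq_true, decide_eq_true_eq, beq_iff_eq] at h1
    · rw [h1.2]; congr 1; simp [h1.1]
    · rw [h1.2]; congr 1; symm; simp only [decide_eq_false_iff_not]; omega
  · have hm := unCount_mono hsub c
    have h1 : unCount a c = 1 := by unfold unCount; rw [hfilt]; rfl
    omega

-- inserting a forced literal keeps DSub
lemma dsub_insert {a α : PySem.Dict Int Bool} (hsub : DSub a α) {l : Int}
    (hforce : α.get? |l| = some (decide (0 < l))) :
    DSub (a.insert |l| (decide (0 < l))) α := by
  intro k v hkv
  rcases eq_or_ne k |l| with hk | hk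
  · subst hk
    rw [PySem.Dict.get?_insert_self] at hkv
    rw [← hkv]; exact hforce
  · rw [PySem.Dict.get?_insert_of_ne _ _ hk] at hkv
    exact hsub _ _ hkv

-- ---------- A-side lemmas ----------

-- blocking: from a sub-assignment of a good fixpoint, a pass never meets an empty clause
lemma aPass_blocked {α : PySem.Dict Int Bool} :
    ∀ (cs : List (List Int)) (ch : Bool) (a : PySem.Dict Int Bool),
      (∀ c ∈ cs, GoodC α c) → DSub a α →
      ∃ ch' a', aPass cs ch a = some (ch', a') ∧ DSub a' α := by
  intro cs
  induction cs with
  | nil => intro ch a _ hsub; exact ⟨ch, a, rfl, hsub⟩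
  | cons c rest ih =>
    intro ch a hg hsub
    have hgc : GoodC α c := hg c (by simp)
    have hgr := fun c' hc' => hg c' (List.mem_cons_of_mem _ hc')
    simp only [aPass]
    by_cases hsat : c.any (fun lit =>
      (decide (0 < lit) && (a.get? |lit| == some true)) ||
      (decide (lit < 0) && (a.get? |lit| == some false))) = true
    · rw [if_pos hsat]; exact ih ch a hgr hsub
    · rw [if_neg hsat]
      have hsat' : c.any (litTrue a) = false := Bool.eq_false_iff.mpr hsat
      rcases hfe : c.filter (fun lit => !(a.contains |lit|)) with _ | ⟨l, tl⟩
      · exact (goodC_not_empty hsub hgc hsat' hfe).elim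
      · rcases tl with _ | ⟨l2, tl2⟩
        · exact ih true _ hgr (dsub_insert hsub (goodC_unit hsub hgc hsat' hfe))
        · exact ih ch a hgr hsub

lemma aPass_changed_true :
    ∀ (cs : List (List Int)) (a : PySem.Dict Int Bool) {ch' : Bool} {a' : PySem.Dict Int Bool},
      aPass cs true a = some (ch', a') → ch' = true := by
  intro cs
  induction cs with
  | nil =>
    intro a ch' a' h
    simp only [aPass, Option.some.injEq, Prod.mk.injEq] at h
    exact h.1.symm
  | cons c rest ih =>
    intro a ch' a' h
    simp only [aPass] at h
    split at h
    · exact ih _ h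
    · split at h
      · simp at h
      · exact ih _ h
      · exact ih _ h

-- a pass that reports no change leaves the assignment intact and certifies a good fixpoint
lemma aPass_false_fix :
    ∀ (cs : List (List Int)) (a : PySem.Dict Int Bool) {a' : PySem.Dict Int Bool},
      aPass cs false a = some (false, a') → a' = a ∧ ∀ c ∈ cs, GoodC a c := by
  intro cs
  induction cs with
  | nil =>
    intro a a' h
    simp only [aPass, Option.some.injEq, Prod.mk.injEq] at h
    exact ⟨h.2.symm, by simp⟩
  | cons c rest ih =>
    intro a a' h
    simp only [aPass] at h
    split at h
    · rename_i hsat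
      obtain ⟨ha, hrest⟩ := ih a h
      refine ⟨ha, ?_⟩
      intro c' hc'
      rcases List.mem_cons.mp hc' with rfl | hc'
      · exact Or.inl hsat
      · exact hrest c' hc'
    · split at h
      · simp at h
      · exact absurd (aPass_changed_true rest _ h) (by simp)
      · rename_i hnil hone
        obtain ⟨ha, hrest⟩ := ih a h
        refine ⟨ha, ?_⟩
        intro c' hc'
        rcases List.mem_cons.mp hc' with rfl | hc'
        · right
          rcases hl : c'.filter (fun lit => !(a.contains |lit|)) with _ | ⟨y1, _ | ⟨y2, ys⟩⟩
          · exact (hnil hl).elim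
          · exact (hone _ hl).elim
          · have h2 : unCount a c' = ys.length + 2 := by
              unfold unCount; rw [hl]; simp
            omega
        · exact hrest c' hc'

-- size / keys invariants of a pass
lemma aPass_inv :
    ∀ (cs : List (List Int)) (ch : Bool) (a : PySem.Dict Int Bool) {ch' : Bool} {a' : PySem.Dict Int Bool},
      aPass cs ch a = some (ch', a') → a.keys.Nodup →
      a'.keys.Nodup ∧ a.size ≤ a'.size ∧
      (∀ k ∈ a'.keys, k ∈ a.keys ∨ k ∈ cs.flatten.map (fun l => |l|)) ∧
      (ch = false → ch' = true → a.size < a'.size) := by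
  intro cs
  induction cs with
  | nil =>
    intro ch a ch' a' h hnd
    simp only [aPass, Option.some.injEq, Prod.mk.injEq] at h
    obtain ⟨h1, h2⟩ := h
    subst h1; subst h2
    refine ⟨hnd, le_refl _, fun k hk => Or.inl hk, fun hf ht => ?_⟩
    rw [hf] at ht; simp at ht
  | cons c rest ih =>
    intro ch a ch' a' h hnd
    simp only [aPass] at h
    have hsubm : ∀ k, k ∈ rest.flatten.map (fun l => |l|) → k ∈ (c :: rest).flatten.map (fun l => |l|) := by
      intro k hk; simp only [List.flatten_cons, List.map_append, List.mem_append]; exact Or.inr hk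
    split at h
    · obtain ⟨h1, h2, h3, h4⟩ := ih ch a h hnd
      exact ⟨h1, h2, fun k hk => (h3 k hk).imp id (hsubm k), h4⟩
    · split at h
      · simp at h
      · rename_i l hfe
        have hlmem : l ∈ c.filter (fun lit => !(a.contains |lit|)) := by rw [hfe]; simp
        have hlc : l ∈ c := (List.mem_filter.mp hlmem).1
        have hna : a.contains |l| = false := by
          have := (List.mem_filter.mp hlmem).2; simpa using this
        have hnd' : (a.insert |l| (decide (0 < l))).keys.Nodup :=
          PySem.Dict.nodup_keys_insert _ _ _ hnd
        have hsz : (a.insert |l| (decide (0 < l))).size = a.size + 1 := by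
          rw [PySem.Dict.size_insert]; simp [hna]
        obtain ⟨h1, h2, h3, -⟩ := ih true _ h hnd'
        refine ⟨h1, by omega, ?_, fun _ _ => by omega⟩
        intro k hk
        rcases h3 k hk with hk' | hk'
        · rcases (PySem.Dict.mem_keys_insert _ _ _ _).mp hk' with rfl | hk''
          · right
            simp only [List.flatten_cons, List.map_append, List.mem_append]
            exact Or.inl (List.mem_map.mpr ⟨l, hlc, rfl⟩)
          · exact Or.inl hk''
        · exact Or.inr (hsubm k hk')
      · obtain ⟨h1, h2, h3, h4⟩ := ih ch a h hnd
        exact ⟨h1, h2, fun k hk => (h3 k hk).imp id (hsubm k), h4⟩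

lemma dict_size_le {a : PySem.Dict Int Bool} {L : List Int}
    (hnd : a.keys.Nodup) (hsub : ∀ k ∈ a.keys, k ∈ L) : a.size ≤ L.length := by
  have h1 : a.size = a.keys.length := by
    simp [PySem.Dict.size, PySem.Dict.keys]
  rw [h1]
  have h2 : a.keys.toFinset.card = a.keys.length := List.toFinset_card_of_nodup hnd
  have h3 : a.keys.toFinset ⊆ L.toFinset := by
    intro x hx
    exact List.mem_toFinset.mpr (hsub x (List.mem_toFinset.mp hx))
  calc a.keys.length = a.keys.toFinset.card := h2.symm
    _ ≤ L.toFinset.card := Finset.card_le_card h3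
    _ ≤ L.length := L.toFinset_card_le

-- if A's loop reports no contradiction (fuel suffices: each changed pass enlarges the assignment),
-- some good fixpoint exists
lemma aLoop_ok :
    ∀ (fuel : Nat) (cs : List (List Int)) (a : PySem.Dict Int Bool),
      a.keys.Nodup → (∀ k ∈ a.keys, k ∈ cs.flatten.map (fun l => |l|)) →
      cs.flatten.length < a.size + fuel →
      (aLoop fuel cs a).1 = true →
      ∃ α, ∀ c ∈ cs, GoodC α c := by
  intro fuel
  induction fuel with
  | zero =>
    intro cs a hnd hk hfuel _
    have hle := dict_size_le hnd hk
    rw [List.length_map] at hle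
    omega
  | succ fuel ih =>
    intro cs a hnd hk hfuel hok
    rw [aLoop] at hok
    rcases hp : aPass cs false a with _ | ⟨ch, a'⟩ <;> rw [hp] at hok
    · simp at hok
    · cases ch with
      | false => exact ⟨a, (aPass_false_fix cs a hp).2⟩
      | true =>
        have hok' : (aLoop fuel cs a').1 = true := by simpa using hok
        obtain ⟨h1, -, h3, h4⟩ := aPass_inv cs false a hp hnd
        have hlt := h4 rfl rfl
        refine ih cs a' h1 (fun k hkk => ?_) (by omega) hok'
        rcases h3 k hkk with hk' | hk'
        · exact hk k hk'
        · exact hk'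

-- from a good fixpoint, A's loop never reports a contradiction
lemma aLoop_blocked {α : PySem.Dict Int Bool} {cs : List (List Int)}
    (hg : ∀ c ∈ cs, GoodC α c) :
    ∀ (fuel : Nat) (a : PySem.Dict Int Bool), DSub a α → (aLoop fuel cs a).1 = true := by
  intro fuel
  induction fuel with
  | zero => intro a _; rw [aLoop]
  | succ fuel ih =>
    intro a hsub
    obtain ⟨ch', a', hp, hsub'⟩ := aPass_blocked cs false a hg hsub
    rw [aLoop, hp]
    cases ch' with
    | false => simp
    | true => simpa using ih a' hsub'

-- ---------- B-side: generic list/dict helpers ----------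

lemma getD_set (cnts : List Int) (k : Nat) (v : Int) (j : Nat) :
    (cnts.set k v).getD j 0 = if j = k ∧ k < cnts.length then v else cnts.getD j 0 := by
  rw [List.getD_eq_getElem?_getD, List.getD_eq_getElem?_getD, List.getElem?_set]
  rcases eq_or_ne k j with rfl | hne
  · by_cases hlt : k < cnts.length
    · simp [hlt]
    · have hnone : cnts[k]? = none := by rw [List.getElem?_eq_none_iff]; omega
      simp [hlt]
  · rw [if_neg hne, if_neg (fun hh => hne hh.1.symm)]

lemma getD_map_length :
    ∀ (cs : List (List Int)) (j : Nat),
      (cs.map (fun c => (c.length : Int))).getD j 0 = ((cs.getD j []).length : Int) := by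
  intro cs
  induction cs with
  | nil => intro j; simp
  | cons c rest ih =>
    intro j
    cases j with
    | zero => simp
    | succ j => simpa using ih j

lemma getD_mem {cs : List (List Int)} {j : Nat} (h : j < cs.length) : cs.getD j [] ∈ cs := by
  rw [List.getD_eq_getElem _ _ h]
  exact List.getElem_mem h

lemma mem_getD (cs : List (List Int)) {c : List Int} (h : c ∈ cs) :
    ∃ j, j < cs.length ∧ cs.getD j [] = c := by
  obtain ⟨j, hj, hje⟩ := List.mem_iff_getElem.mp h
  exact ⟨j, hj, by rw [List.getD_eq_getElem _ _ hj, hje]⟩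

-- ---------- B-side: unCount / litTrue under a fresh insertion ----------

lemma unCount_empty (c : List Int) : unCount PySem.Dict.empty c = c.length := by
  unfold unCount
  have hall : ∀ lit : Int, (!(PySem.Dict.empty : PySem.Dict Int Bool).contains |lit|) = true := by
    intro lit; rw [PySem.Dict.contains_empty]; rfl
  rw [List.filter_eq_self.mpr (fun l _ => hall l)]

lemma dsub_insert_fresh {a : PySem.Dict Int Bool} {v : Int} {b : Bool}
    (h : a.contains v = false) : DSub a (a.insert v b) := by
  intro k w hk
  have hne : k ≠ v := by
    rintro rfl
    rw [PySem.Dict.contains_eq_isSome_get?, hk] at h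
    simp at h
  rw [PySem.Dict.get?_insert_of_ne _ _ hne]
  exact hk

lemma unCount_insert {a : PySem.Dict Int Bool} {v : Int} (b : Bool)
    (h : a.contains v = false) (c : List Int) :
    unCount a c = unCount (a.insert v b) c + (c.filter (fun l => |l| == v)).length := by
  induction c with
  | nil => simp [unCount]
  | cons l c' ih =>
    simp only [unCount, List.filter_cons] at ih ⊢
    have hci : (a.insert v b).contains |l| = ((|l| == v) || a.contains |l|) :=
      PySem.Dict.contains_insert a v |l| b
    rw [hci]
    by_cases hv : |l| = v
    · have h1 : a.contains |l| = false := hv ▸ h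
      rw [h1, hv]
      simp
      omega
    · have hvb : ((|l| == v)) = false := by simp [hv]
      rw [hvb]
      by_cases hc : a.contains |l| = true
      · rw [hc]; simp; omega
      · rw [Bool.eq_false_iff.mpr hc]; simp; omega

lemma litTrue_mono {a a' : PySem.Dict Int Bool} (h : DSub a a') {l : Int}
    (hl : litTrue a l = true) : litTrue a' l = true := by
  unfold litTrue at hl ⊢
  rcases Bool.or_eq_true_iff.mp hl with h1 | h1 <;>
    simp only [Bool.and_eq_true, decide_eq_true_eq, beq_iff_eq] at h1
  · simp [h1.1, h _ _ h1.2]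
  · simp [h1.1, h _ _ h1.2]

-- ---------- B-side: bOccClause / bInit structure ----------

-- proof-side descriptions of what bInit appends
def occTail : List (List Int) → Nat → Int → List Nat
  | [], _, _ => []
  | c :: rest, i, v => List.replicate ((c.filter (fun l => |l| == v)).length) i ++ occTail rest (i+1) v

def pendTail : List (List Int) → Nat → List Nat
  | [], _ => []
  | c :: rest, i => (if c.length ≤ 1 then [i] else []) ++ pendTail rest (i+1)

lemma bOccClause_getD :
    ∀ (clause : List Int) (i : Nat) (occ : PySem.Dict Int (List Nat)) (v : Int),
      (bOccClause i occ clause).getD v [] =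
        occ.getD v [] ++ List.replicate ((clause.filter (fun l => |l| == v)).length) i := by
  intro clause
  induction clause with
  | nil => intro i occ v; simp [bOccClause]
  | cons l rest ih =>
    intro i occ v
    show (bOccClause i (occ.insert |l| (occ.getD |l| [] ++ [i])) rest).getD v [] = _
    rw [ih]
    by_cases hv : v = |l|
    · subst hv
      rw [PySem.Dict.getD_insert_self]
      simp [List.replicate_succ]
    · rw [PySem.Dict.getD_insert_of_ne _ _ _ hv]
      have hvb : ((|l| == v)) = false := by simp; exact fun hh => hv hh.symm
      simp [hvb]

lemma bInit_snd :
    ∀ (rest : List (List Int)) (i : Nat) (occ : PySem.Dict Int (List Nat)) (cnts : List Int) (pend : List Nat),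
      (bInit rest i (occ, cnts, pend)).2 =
        (cnts ++ rest.map (fun c => (c.length : Int)), pend ++ pendTail rest i) := by
  intro rest
  induction rest with
  | nil => intro i occ cnts pend; simp [bInit, pendTail]
  | cons c rest ih =>
    intro i occ cnts pend
    show (bInit rest (i+1) _).2 = _
    rw [ih]
    simp only [pendTail, List.map_cons]
    refine Prod.ext ?_ ?_ <;> simp only
    · simp
    · by_cases hlen : c.length ≤ 1 <;> simp [hlen]

lemma bInit_occ :
    ∀ (rest : List (List Int)) (i : Nat) (occ : PySem.Dict Int (List Nat)) (cnts : List Int) (pend : List Nat) (v : Int),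
      (bInit rest i (occ, cnts, pend)).1.getD v [] = occ.getD v [] ++ occTail rest i v := by
  intro rest
  induction rest with
  | nil => intro i occ cnts pend v; simp [bInit, occTail]
  | cons c rest ih =>
    intro i occ cnts pend v
    show (bInit rest (i+1) _).1.getD v [] = _
    rw [ih, bOccClause_getD]
    simp [occTail]

lemma mem_occTail :
    ∀ (rest : List (List Int)) (i : Nat) (v : Int) (j : Nat),
      j ∈ occTail rest i v → i ≤ j ∧ j - i < rest.length := by
  intro rest
  induction rest with
  | nil => intro i v j h; simp [occTail] at h
  | cons c rest ih =>
    intro i v j h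
    simp only [occTail, List.mem_append, List.mem_replicate] at h
    rcases h with ⟨-, rfl⟩ | h
    · simp
    · have := ih (i+1) v j h
      constructor <;> [omega; (simp only [List.length_cons]; omega)]

lemma count_occTail :
    ∀ (rest : List (List Int)) (i : Nat) (v : Int) (j : Nat),
      (occTail rest i v).count j =
        if i ≤ j ∧ j - i < rest.length
        then ((rest.getD (j - i) []).filter (fun l => |l| == v)).length else 0 := by
  intro rest
  induction rest with
  | nil => intro i v j; simp [occTail]
  | cons c rest ih =>
    intro i v j
    simp only [occTail, List.count_append, List.count_replicate, ih (i+1) v j]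
    rcases eq_or_ne j i with rfl | hne
    · have e1 : ((j == j) = true) := by simp
      have e2 : ¬(j + 1 ≤ j ∧ j - (j+1) < rest.length) := by omega
      have e3 : (j ≤ j ∧ j - j < (c :: rest).length) := by
        simp only [List.length_cons]; omega
      have h2 : j - j = 0 := by omega
      rw [if_pos e1, if_neg e2, if_pos e3, h2, List.getD_cons_zero]
      omega
    · have hbi : ¬((i == j) = true) := by simp; exact fun hh => hne hh.symm
      rw [if_neg hbi]
      by_cases hle : i + 1 ≤ j
      · have h2 : j - i = (j - (i+1)) + 1 := by omega
        rw [h2, List.getD_cons_succ]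
        by_cases hc : i + 1 ≤ j ∧ j - (i + 1) < rest.length
        · rw [if_pos hc, if_pos (show i ≤ j ∧ (j-(i+1))+1 < (c::rest).length by
            simp only [List.length_cons]; omega)]
          omega
        · rw [if_neg hc, if_neg (show ¬(i ≤ j ∧ (j-(i+1))+1 < (c::rest).length) by
            simp only [List.length_cons]; omega)]
      · rw [if_neg (fun hh => hle hh.1), if_neg (show ¬(i ≤ j ∧ j - i < (c::rest).length) by
          simp only [List.length_cons]; omega)]

lemma length_occTail :
    ∀ (rest : List (List Int)) (i : Nat) (v : Int),
      (occTail rest i v).length = (rest.flatten.filter (fun l => |l| == v)).length := by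
  intro rest
  induction rest with
  | nil => intro i v; simp [occTail]
  | cons c rest ih =>
    intro i v
    simp [occTail, List.filter_append, ih (i+1) v]

lemma mem_pendTail :
    ∀ (rest : List (List Int)) (i : Nat) (j : Nat),
      j ∈ pendTail rest i ↔ i ≤ j ∧ j - i < rest.length ∧ (rest.getD (j - i) []).length ≤ 1 := by
  intro rest
  induction rest with
  | nil => intro i j; simp [pendTail]
  | cons c rest ih =>
    intro i j
    simp only [pendTail, List.mem_append, ih (i+1) j, List.length_cons]
    constructor
    · rintro (hmem | ⟨h1, h2, h3⟩)
      · have hji : j = i ∧ c.length ≤ 1 := by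
          by_cases hlen : c.length ≤ 1
          · rw [if_pos hlen] at hmem; exact ⟨by simpa using hmem, hlen⟩
          · rw [if_neg hlen] at hmem; simp at hmem
        obtain ⟨rfl, hlen⟩ := hji
        have h2 : j - j = 0 := by omega
        rw [h2, List.getD_cons_zero]
        exact ⟨le_refl _, by omega, hlen⟩
      · have h4 : j - i = (j - (i+1)) + 1 := by omega
        rw [h4, List.getD_cons_succ]
        exact ⟨by omega, by omega, h3⟩
    · rintro ⟨h1, h2, h3⟩
      rcases eq_or_ne j i with rfl | hne
      · left
        have h4 : j - j = 0 := by omega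
        rw [h4, List.getD_cons_zero] at h3
        rw [if_pos h3]
        simp
      · right
        have h4 : j - i = (j - (i+1)) + 1 := by omega
        rw [h4, List.getD_cons_succ] at h3
        exact ⟨by omega, by omega, h3⟩

lemma length_pendTail :
    ∀ (rest : List (List Int)) (i : Nat), (pendTail rest i).length ≤ rest.length := by
  intro rest
  induction rest with
  | nil => intro i; simp [pendTail]
  | cons c rest ih =>
    intro i
    simp only [pendTail, List.length_append, List.length_cons]
    have := ih (i+1)
    by_cases hlen : c.length ≤ 1 <;> simp [hlen] <;> omega

-- ---------- B-side: bDecr lemmas ----------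

lemma bDecr_length :
    ∀ (os : List Nat) (cnts : List Int) (pend : List Nat),
      (bDecr os cnts pend).1.length = cnts.length := by
  intro os
  induction os with
  | nil => intro cnts pend; rfl
  | cons k os ih =>
    intro cnts pend
    simp only [bDecr]
    split <;> rw [ih] <;> simp

lemma bDecr_getD (j : Nat) :
    ∀ (os : List Nat) (cnts : List Int) (pend : List Nat),
      (∀ x ∈ os, x < cnts.length) →
      (bDecr os cnts pend).1.getD j 0 = cnts.getD j 0 - (os.count j : Int) := by
  intro os
  induction os with
  | nil => intro cnts pend _; simp [bDecr]
  | cons k os ih =>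
    intro cnts pend h
    have hk : k < cnts.length := h k (by simp)
    have h' : ∀ x ∈ os, x < (cnts.set k (cnts.getD k 0 - 1)).length := by
      intro x hx; rw [List.length_set]; exact h x (List.mem_cons_of_mem _ hx)
    have hset := getD_set cnts k (cnts.getD k 0 - 1) j
    have hcnt : ((k :: os).count j : Int) = (os.count j : Int) + (if k = j then 1 else 0) := by
      rw [List.count_cons]
      by_cases hkj : k = j <;> simp [hkj]
    have key : ∀ pend' : List Nat,
        (bDecr os (cnts.set k (cnts.getD k 0 - 1)) pend').1.getD j 0
          = cnts.getD j 0 - ((k :: os).count j : Int) := by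
      intro pend'
      rw [ih _ _ h', hset, hcnt]
      by_cases hkj : j = k
      · subst hkj
        rw [if_pos ⟨rfl, hk⟩, if_pos rfl]
        omega
      · rw [if_neg (fun hh => hkj hh.1), if_neg (fun hh => hkj hh.symm)]
        omega
    simp only [bDecr]
    split <;> exact key _

lemma bDecr_cnt_mono (j : Nat) :
    ∀ (os : List Nat) (cnts : List Int) (pend : List Nat),
      (bDecr os cnts pend).1.getD j 0 ≤ cnts.getD j 0 := by
  intro os
  induction os with
  | nil => intro cnts pend; simp [bDecr]
  | cons k os ih =>
    intro cnts pend
    have hset := getD_set cnts k (cnts.getD k 0 - 1) j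
    have hle : (cnts.set k (cnts.getD k 0 - 1)).getD j 0 ≤ cnts.getD j 0 := by
      rw [hset]; split_ifs with hc
      · rw [hc.1]; omega
      · exact le_refl _
    simp only [bDecr]
    split <;> exact le_trans (ih _ _) hle

lemma bDecr_pend_mono {j : Nat} :
    ∀ (os : List Nat) (cnts : List Int) (pend : List Nat),
      j ∈ pend → j ∈ (bDecr os cnts pend).2 := by
  intro os
  induction os with
  | nil => intro cnts pend h; exact h
  | cons k os ih =>
    intro cnts pend h
    simp only [bDecr]
    split
    · exact ih _ _ (List.mem_append_left _ h)
    · exact ih _ _ h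

lemma bDecr_pend_src {j : Nat} :
    ∀ (os : List Nat) (cnts : List Int) (pend : List Nat),
      j ∈ (bDecr os cnts pend).2 → j ∈ pend ∨ j ∈ os := by
  intro os
  induction os with
  | nil => intro cnts pend h; exact Or.inl h
  | cons k os ih =>
    intro cnts pend h
    simp only [bDecr] at h
    split at h
    · rcases ih _ _ h with hp | ho
      · rcases List.mem_append.mp hp with hp | hp
        · exact Or.inl hp
        · right; simp at hp; simp [hp]
      · right; exact List.mem_cons_of_mem _ ho
    · rcases ih _ _ h with hp | ho
      · exact Or.inl hp
      · right; exact List.mem_cons_of_mem _ ho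

lemma bDecr_pushed {j : Nat} :
    ∀ (os : List Nat) (cnts : List Int) (pend : List Nat),
      j ∈ (bDecr os cnts pend).2 → j ∈ pend ∨ (bDecr os cnts pend).1.getD j 0 ≤ 1 := by
  intro os
  induction os with
  | nil => intro cnts pend h; exact Or.inl h
  | cons k os ih =>
    intro cnts pend h
    simp only [bDecr] at h ⊢
    split at h <;> rename_i hcond
    · rcases ih _ _ h with hp | hle
      · rcases List.mem_append.mp hp with hp | hp
        · exact Or.inl hp
        · right
          have hj : j = k := by simpa using hp
          subst hj
          rw [if_pos hcond]
          exact le_trans (bDecr_cnt_mono j os _ _) hcond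
      · right; rw [if_pos hcond]; exact hle
    · rcases ih _ _ h with hp | hle
      · exact Or.inl hp
      · right; rw [if_neg hcond]; exact hle

lemma bDecr_push_complete {j : Nat} :
    ∀ (os : List Nat) (cnts : List Int) (pend : List Nat),
      (∀ x ∈ os, x < cnts.length) → j ∈ os →
      (bDecr os cnts pend).1.getD j 0 ≤ 1 → j ∈ (bDecr os cnts pend).2 := by
  intro os
  induction os with
  | nil => intro cnts pend _ h; simp at h
  | cons k os ih =>
    intro cnts pend hbnd hmem hle
    have h' : ∀ x ∈ os, x < (cnts.set k (cnts.getD k 0 - 1)).length := by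
      intro x hx; rw [List.length_set]; exact hbnd x (List.mem_cons_of_mem _ hx)
    by_cases hmo : j ∈ os
    · simp only [bDecr] at hle ⊢
      split at hle <;> rename_i hcond
      · rw [if_pos hcond]; exact ih _ _ h' hmo hle
      · rw [if_neg hcond]; exact ih _ _ h' hmo hle
    · have hjk : j = k := by
        rcases List.mem_cons.mp hmem with h | h
        · exact h
        · exact absurd h hmo
      subst hjk
      simp only [bDecr] at hle ⊢
      have hfin : (bDecr os (cnts.set j (cnts.getD j 0 - 1)) (pend ++ [j])).1.getD j 0 =
          (cnts.set j (cnts.getD j 0 - 1)).getD j 0 := by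
        rw [bDecr_getD j os _ _ h', List.count_eq_zero.mpr hmo]
        simp
      have hfin2 : (bDecr os (cnts.set j (cnts.getD j 0 - 1)) pend).1.getD j 0 =
          (cnts.set j (cnts.getD j 0 - 1)).getD j 0 := by
        rw [bDecr_getD j os _ _ h', List.count_eq_zero.mpr hmo]
        simp
      split at hle <;> rename_i hcond
      · rw [if_pos hcond]
        exact bDecr_pend_mono os _ _ (List.mem_append_right _ (by simp))
      · exact absurd (hfin2 ▸ hle) hcond

lemma bDecr_pend_len :
    ∀ (os : List Nat) (cnts : List Int) (pend : List Nat),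
      (bDecr os cnts pend).2.length ≤ pend.length + os.length := by
  intro os
  induction os with
  | nil => intro cnts pend; simp [bDecr]
  | cons k os ih =>
    intro cnts pend
    simp only [bDecr]
    split
    · have := ih (cnts.set k (cnts.getD k 0 - 1)) (pend ++ [k])
      simp only [List.length_append, List.length_cons, List.length_nil] at this ⊢
      omega
    · have := ih (cnts.set k (cnts.getD k 0 - 1)) pend
      simp only [List.length_cons]
      omega

-- ---------- B-side: loop invariants ----------

def OccInv (cs : List (List Int)) (occ : PySem.Dict Int (List Nat)) : Prop :=
  (∀ v j, (occ.getD v []).count j = ((cs.getD j []).filter (fun l => |l| == v)).length) ∧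
  (∀ v, (occ.getD v []).length = (cs.flatten.filter (fun l => |l| == v)).length) ∧
  (∀ v j, j ∈ occ.getD v [] → j < cs.length)

def CntInv (cs : List (List Int)) (cnts : List Int) (a : PySem.Dict Int Bool) : Prop :=
  cnts.length = cs.length ∧ ∀ j, cnts.getD j 0 = ((unCount a (cs.getD j [])) : Int)

def PendInv (cs : List (List Int)) (a : PySem.Dict Int Bool) (pending : List Nat) : Prop :=
  ∀ j ∈ pending, j < cs.length ∧ unCount a (cs.getD j []) ≤ 1

def FixInv (cs : List (List Int)) (a : PySem.Dict Int Bool) (pending : List Nat) : Prop :=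
  ∀ j, j < cs.length → GoodC a (cs.getD j []) ∨ j ∈ pending

-- one propagation step (the find?-some branch) preserves the counter invariant
lemma bStep_cnt {cs : List (List Int)} {occ : PySem.Dict Int (List Nat)}
    {cnts : List Int} {a : PySem.Dict Int Bool} {v : Int} (b : Bool) (rest : List Nat)
    (hOcc : OccInv cs occ) (hCnt : CntInv cs cnts a) (hfresh : a.contains v = false) :
    CntInv cs (bDecr (occ.getD v []) cnts rest).1 (a.insert v b) := by
  obtain ⟨hcnt, -, hbnd⟩ := hOcc
  obtain ⟨hlength, hval⟩ := hCnt
  have hbos : ∀ x ∈ occ.getD v [], x < cnts.length := by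
    intro x hx; rw [hlength]; exact hbnd v x hx
  constructor
  · rw [bDecr_length, hlength]
  · intro j
    have h1 := bDecr_getD j (occ.getD v []) cnts rest hbos
    have h2 := hcnt v j
    have h3 := unCount_insert b hfresh (cs.getD j [])
    have h4 := hval j
    rw [h1, h4, ← h2] at *
    omega

-- … and the pending-queue invariant
lemma bStep_pend {cs : List (List Int)} {occ : PySem.Dict Int (List Nat)}
    {cnts : List Int} {a : PySem.Dict Int Bool} {v : Int} (b : Bool) {i : Nat} {rest : List Nat}
    (hOcc : OccInv cs occ) (hCnt : CntInv cs cnts a)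
    (hPend : PendInv cs a (i :: rest)) (hfresh : a.contains v = false) :
    PendInv cs (a.insert v b) (bDecr (occ.getD v []) cnts rest).2 := by
  have hCnt' := bStep_cnt (cs := cs) b rest hOcc hCnt hfresh
  have hsub : DSub a (a.insert v b) := dsub_insert_fresh hfresh
  intro j hj
  have hsrc := bDecr_pend_src (occ.getD v []) cnts rest hj
  have hbound : j < cs.length := by
    rcases hsrc with h | h
    · exact (hPend j (List.mem_cons_of_mem _ h)).1
    · exact hOcc.2.2 v j h
  refine ⟨hbound, ?_⟩
  rcases bDecr_pushed (occ.getD v []) cnts rest hj with h | h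
  · exact le_trans (unCount_mono hsub _) (hPend j (List.mem_cons_of_mem _ h)).2
  · have := hCnt'.2 j
    omega

-- … and the fixpoint-coverage invariant
lemma bStep_fix {cs : List (List Int)} {occ : PySem.Dict Int (List Nat)}
    {cnts : List Int} {a : PySem.Dict Int Bool} {lit : Int} (b : Bool) {i : Nat} {rest : List Nat}
    (hOcc : OccInv cs occ) (hCnt : CntInv cs cnts a)
    (hFix : FixInv cs a (i :: rest)) (hfresh : a.contains |lit| = false)
    (hmem : lit ∈ cs.getD i []) :
    FixInv cs (a.insert |lit| b) (bDecr (occ.getD |lit| []) cnts rest).2 := by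
  have hCnt' := bStep_cnt (cs := cs) b rest hOcc hCnt hfresh
  have hsub : DSub a (a.insert |lit| b) := dsub_insert_fresh hfresh
  have hbos : ∀ x ∈ occ.getD |lit| [], x < cnts.length := by
    intro x hx; rw [hCnt.1]; exact hOcc.2.2 |lit| x hx
  intro j hj
  by_cases hnotGood' : GoodC (a.insert |lit| b) (cs.getD j [])
  · exact Or.inl hnotGood'
  have hnotGood := hnotGood'
  rcases Nat.eq_zero_or_pos ((cs.getD j []).filter (fun l => |l| == |lit|)).length with hz | hp
  · -- clause j does not mention the assigned variable
    have heq : unCount a (cs.getD j []) = unCount (a.insert |lit| b) (cs.getD j []) := by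
      have := unCount_insert b hfresh (cs.getD j [])
      omega
    have hGoodOld : ¬ GoodC a (cs.getD j []) := by
      intro hG
      apply hnotGood
      rcases hG with hsat | hcnt2
      · obtain ⟨l, hl, hlt⟩ := List.any_eq_true.mp hsat
        exact Or.inl (List.any_eq_true.mpr ⟨l, hl, litTrue_mono hsub hlt⟩)
      · exact Or.inr (by omega)
    rcases hFix j hj with hG | hmem'
    · exact absurd hG hGoodOld
    · rcases List.mem_cons.mp hmem' with rfl | hmem''
      · exfalso
        have : lit ∈ (cs.getD j []).filter (fun l => |l| == |lit|) := by
          rw [List.mem_filter]; exact ⟨hmem, by simp⟩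
        rw [List.length_eq_zero_iff.mp hz] at this
        simp at this
      · exact Or.inr (bDecr_pend_mono _ _ _ hmem'')
  · -- clause j mentions the assigned variable: its counter was decremented and it was (re)queued
    have hjos : j ∈ occ.getD |lit| [] := by
      rw [← List.count_pos_iff]
      rw [hOcc.1 |lit| j]
      exact hp
    have hle : unCount (a.insert |lit| b) (cs.getD j []) ≤ 1 := by
      by_contra hgt
      exact hnotGood (Or.inr (by omega))
    have hcle : (bDecr (occ.getD |lit| []) cnts rest).1.getD j 0 ≤ 1 := by
      have := hCnt'.2 j
      omega
    exact Or.inr (bDecr_push_complete _ _ _ hbos hjos hcle)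

-- fuel decrease of a propagation step
lemma bStep_fuel {cs : List (List Int)} {occ : PySem.Dict Int (List Nat)}
    (cnts : List Int) {a : PySem.Dict Int Bool} {v : Int} (b : Bool) (rest : List Nat)
    (hOcc : OccInv cs occ) (hfresh : a.contains v = false) :
    (bDecr (occ.getD v []) cnts rest).2.length +
      unCount (a.insert v b) cs.flatten <
    rest.length + 1 + unCount a cs.flatten := by
  have h1 := bDecr_pend_len (occ.getD v []) cnts rest
  have h2 := hOcc.2.1 v
  have h3 := unCount_insert b hfresh cs.flatten
  -- the assigned variable occurs in cs.flatten at least once? not needed: count ≥ 0 suffices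
  omega

-- if B's loop reports no contradiction, some good fixpoint exists
lemma bLoop_ok {cs : List (List Int)} {occ : PySem.Dict Int (List Nat)} (hOcc : OccInv cs occ) :
    ∀ (fuel : Nat) (cnts : List Int) (a : PySem.Dict Int Bool) (pending : List Nat),
      CntInv cs cnts a → PendInv cs a pending → FixInv cs a pending →
      pending.length + unCount a cs.flatten < fuel →
      bLoop fuel cs occ cnts a pending = false →
      ∃ α, ∀ c ∈ cs, GoodC α c := by
  intro fuel
  induction fuel with
  | zero => intro cnts a pending _ _ _ hΦ _; omega
  | succ fuel ih =>
    intro cnts a pending hCnt hPend hFix hΦ hok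
    match pending with
    | [] =>
      refine ⟨a, fun c hc => ?_⟩
      obtain ⟨j, hj, hje⟩ := mem_getD cs hc
      rcases hFix j hj with hG | hmem
      · rw [← hje]; exact hG
      · simp at hmem
    | i :: rest =>
      simp only [bLoop] at hok
      by_cases hsat : (cs.getD i []).any (litTrue a) = true
      · rw [if_pos hsat] at hok
        refine ih cnts a rest hCnt (fun j hj => hPend j (List.mem_cons_of_mem _ hj)) ?_
          (by simp only [List.length_cons] at hΦ; omega) hok
        intro j hj
        rcases hFix j hj with hG | hmem
        · exact Or.inl hG
        · rcases List.mem_cons.mp hmem with rfl | hmem'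
          · exact Or.inl (Or.inl hsat)
          · exact Or.inr hmem'
      · rw [if_neg hsat] at hok
        rcases hfind : (cs.getD i []).find? (fun lit => !(a.contains |lit|)) with _ | lit
        · rw [hfind] at hok
          simp at hok
        · rw [hfind] at hok
          have hfresh : a.contains |lit| = false := by
            have := List.find?_some hfind
            simpa using this
          have hmem : lit ∈ cs.getD i [] := List.mem_of_find?_eq_some hfind
          refine ih _ _ _ (bStep_cnt _ rest hOcc hCnt hfresh)
            (bStep_pend _ hOcc hCnt hPend hfresh)
            (bStep_fix _ hOcc hCnt hFix hfresh hmem) ?_ hok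
          have := bStep_fuel (cs := cs) cnts (decide (0 < lit)) rest hOcc hfresh
          simp only [List.length_cons] at hΦ
          omega

-- from a good fixpoint, B's loop never reports a contradiction
lemma bLoop_blocked {α : PySem.Dict Int Bool} {cs : List (List Int)}
    {occ : PySem.Dict Int (List Nat)} (hOcc : OccInv cs occ)
    (hg : ∀ c ∈ cs, GoodC α c) :
    ∀ (fuel : Nat) (cnts : List Int) (a : PySem.Dict Int Bool) (pending : List Nat),
      CntInv cs cnts a → PendInv cs a pending → DSub a α →
      bLoop fuel cs occ cnts a pending = false := by
  intro fuel
  induction fuel with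
  | zero => intro cnts a pending _ _ _; rw [bLoop]
  | succ fuel ih =>
    intro cnts a pending hCnt hPend hsub
    match pending with
    | [] => rfl
    | i :: rest =>
      simp only [bLoop]
      by_cases hsat : (cs.getD i []).any (litTrue a) = true
      · rw [if_pos hsat]
        exact ih cnts a rest hCnt (fun j hj => hPend j (List.mem_cons_of_mem _ hj)) hsub
      · rw [if_neg hsat]
        have hsat' : (cs.getD i []).any (litTrue a) = false := Bool.eq_false_iff.mpr hsat
        have hi : i < cs.length := (hPend i (by simp)).1
        have hGood : GoodC α (cs.getD i []) := hg _ (getD_mem hi)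
        rcases hfind : (cs.getD i []).find? (fun lit => !(a.contains |lit|)) with _ | lit
        · exfalso
          have hfilt : (cs.getD i []).filter (fun lit => !(a.contains |lit|)) = [] := by
            rw [List.filter_eq_nil_iff]
            intro x hx
            have := List.find?_eq_none.mp hfind x hx
            simpa using this
          exact goodC_not_empty hsub hGood hsat' hfilt
        · have hfresh : a.contains |lit| = false := by
            have := List.find?_some hfind
            simpa using this
          have hmemf : lit ∈ (cs.getD i []).filter (fun lit => !(a.contains |lit|)) := by
            rw [List.mem_filter]
            exact ⟨List.mem_of_find?_eq_some hfind, by simp [hfresh]⟩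
          have hlen1 : ((cs.getD i []).filter (fun lit => !(a.contains |lit|))).length = 1 := by
            have hle := (hPend i (by simp)).2
            unfold unCount at hle
            have : 0 < ((cs.getD i []).filter (fun lit => !(a.contains |lit|))).length :=
              List.length_pos_of_mem hmemf
            omega
          obtain ⟨x, hx⟩ := List.length_eq_one_iff.mp hlen1
          have hfilt : (cs.getD i []).filter (fun lit => !(a.contains |lit|)) = [lit] := by
            rw [hx] at hmemf ⊢
            simp at hmemf
            rw [hmemf]
          have hforce := goodC_unit hsub hGood hsat' hfilt
          exact ih _ _ _ (bStep_cnt _ rest hOcc hCnt hfresh)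
            (bStep_pend _ hOcc hCnt hPend hfresh)
            (dsub_insert hsub hforce)

-- ---------- initial state ----------

lemma bInit_state (cs : List (List Int)) :
    OccInv cs (bInit cs 0 (PySem.Dict.empty, [], [])).1 ∧
    CntInv cs (bInit cs 0 (PySem.Dict.empty, [], [])).2.1 PySem.Dict.empty ∧
    PendInv cs PySem.Dict.empty (bInit cs 0 (PySem.Dict.empty, [], [])).2.2 ∧
    FixInv cs PySem.Dict.empty (bInit cs 0 (PySem.Dict.empty, [], [])).2.2 ∧
    (bInit cs 0 (PySem.Dict.empty, [], [])).2.2.length + unCount PySem.Dict.empty cs.flatten <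
      cs.length + cs.flatten.length + 1 := by
  have hsnd := bInit_snd cs 0 PySem.Dict.empty [] []
  have hocc := bInit_occ cs 0 PySem.Dict.empty [] []
  have hoccD : ∀ v, (bInit cs 0 (PySem.Dict.empty, [], [])).1.getD v [] = occTail cs 0 v := by
    intro v
    rw [hocc v]
    simp [PySem.Dict.getD_empty]
  have hc1 : (bInit cs 0 (PySem.Dict.empty, [], [])).2.1 = cs.map (fun c => (c.length : Int)) := by
    rw [hsnd]; simp
  have hp1 : (bInit cs 0 (PySem.Dict.empty, [], [])).2.2 = pendTail cs 0 := by
    rw [hsnd]; simp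
  refine ⟨⟨?_, ?_, ?_⟩, ⟨?_, ?_⟩, ?_, ?_, ?_⟩
  · intro v j
    rw [hoccD v, count_occTail cs 0 v j]
    by_cases hj : j < cs.length
    · rw [if_pos ⟨Nat.zero_le _, by omega⟩]
      simp
    · rw [if_neg (by omega)]
      have : cs.getD j [] = [] := List.getD_eq_default _ _ (by omega)
      rw [this]
      simp
  · intro v
    rw [hoccD v, length_occTail cs 0 v]
  · intro v j hj
    rw [hoccD v] at hj
    have := mem_occTail cs 0 v j hj
    omega
  · rw [hc1, List.length_map]
  · intro j
    rw [hc1, getD_map_length cs j, unCount_empty]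
  · intro j hj
    rw [hp1, mem_pendTail cs 0 j] at hj
    rw [unCount_empty]
    refine ⟨by omega, ?_⟩
    have h2 := hj.2.2
    have h3 : j - 0 = j := by omega
    rw [h3] at h2
    exact h2
  · intro j hj
    by_cases hlen : (cs.getD j []).length ≤ 1
    · right
      rw [hp1, mem_pendTail cs 0 j]
      refine ⟨Nat.zero_le _, by omega, ?_⟩
      have h3 : j - 0 = j := by omega
      rw [h3]
      exact hlen
    · left
      right
      rw [unCount_empty]
      omega
  · rw [hp1, unCount_empty]
    have := length_pendTail cs 0
    omega

lemma dsub_empty (α : PySem.Dict Int Bool) : DSub PySem.Dict.empty α := by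
  intro k v hkv
  rw [PySem.Dict.get?_empty] at hkv
  simp at hkv

lemma empty_keys_sub (L : List Int) :
    ∀ k ∈ (PySem.Dict.empty : PySem.Dict Int Bool).keys, k ∈ L := by
  intro k hk
  rw [PySem.Dict.keys_empty] at hk
  simp at hk

lemma ok_iff (cs : List (List Int)) :
    (aLoop (cs.flatten.length + 1) cs PySem.Dict.empty).1 = true ↔
    bLoop (cs.length + cs.flatten.length + 1) cs
      (bInit cs 0 (PySem.Dict.empty, [], [])).1
      (bInit cs 0 (PySem.Dict.empty, [], [])).2.1
      PySem.Dict.empty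
      (bInit cs 0 (PySem.Dict.empty, [], [])).2.2 = false := by
  obtain ⟨hOcc, hCnt, hPend, hFix, hΦ⟩ := bInit_state cs
  constructor
  · intro h
    obtain ⟨α, hα⟩ := aLoop_ok _ cs _ PySem.Dict.nodup_keys_empty
      (empty_keys_sub _) (by rw [PySem.Dict.size_empty]; omega) h
    exact bLoop_blocked hOcc hα _ _ _ _ hCnt hPend (dsub_empty α)
  · intro h
    obtain ⟨α, hα⟩ := bLoop_ok hOcc _ _ _ _ hCnt hPend hFix hΦ h
    exact aLoop_blocked hα _ _ (dsub_empty α)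

-- ===== VERDICT (by name: the statement is the Claim_ definition above) =====
theorem sat_contradiction_check_spec : Claim_equal_sat_contradiction_check := by
  intro cs _
  unfold Spec_sat_contradiction_check sat_contradiction_check sat_contradiction_check_alt
  rcases ha : (aLoop (cs.flatten.length + 1) cs PySem.Dict.empty).1 with _ | _
  · have hb : bLoop (cs.length + cs.flatten.length + 1) cs
        (bInit cs 0 (PySem.Dict.empty, [], [])).1
        (bInit cs 0 (PySem.Dict.empty, [], [])).2.1
        PySem.Dict.empty
        (bInit cs 0 (PySem.Dict.empty, [], [])).2.2 = true := by
      rcases hb' : bLoop (cs.length + cs.flatten.length + 1) cs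
          (bInit cs 0 (PySem.Dict.empty, [], [])).1
          (bInit cs 0 (PySem.Dict.empty, [], [])).2.1
          PySem.Dict.empty
          (bInit cs 0 (PySem.Dict.empty, [], [])).2.2 with _ | _
      · rw [(ok_iff cs).mpr hb'] at ha; exact absurd ha (by simp)
      · rfl
    simp only [ha, hb]
    simp
  · have hb := (ok_iff cs).mp ha
    simp only [ha, hb]
    simp
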